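-- pv_equiv track=rewrite | github.com/daijiong1977/news | data_collector.py | is_video_article
-- ===== SOURCE A (Python) =====
-- def is_video_article(title, description, url):
--     """Check if article is a video/show/segment (should be skipped).
--     Only skip if it's clearly about watching/viewing video content."""
--     # Only skip if explicitly marked as video content to watch
--     video_keywords = [
--         'watch:', 'video:', 'segment -',
--         'pbs newshour episode', 'full episode',
--         'video episode'
--     ]
--
--     combined = f"{title} {description} {url}".lower()
--
--     for keyword in video_keywords:
--         if keyword in combined:
--             return True
--
--     return False
-- ===== SOURCE B (Python) =====
-- def is_video_article(title, description, url):
--     """Check if article is a video/show/segment (should be skipped).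
--     Streaming multi-pattern matcher: one pass over the combined string,
--     maintaining the set of partially matched keyword suffixes (an NFA
--     simulation), instead of one full substring scan per keyword."""
--     video_keywords = [
--         'watch:', 'video:', 'segment -',
--         'pbs newshour episode', 'full episode',
--         'video episode'
--     ]
--     s = f"{title} {description} {url}".lower()
--     active = []
--     for ch in s:
--         next_active = []
--         for k in active + video_keywords:
--             if k[0] == ch:
--                 rest = k[1:]
--                 if not rest:
--                     return True
--                 next_active.append(rest)
--         active = next_active
--     return False
-- ===== Notes on version B (the rewrite author's own statement) =====
-- stated objective: alternative
-- what changed: Replaced A's per-keyword loop of independent full substring scans by a single streaming pass over the combined string that maintains the set of partially matched keyword suffixes (an NFA simulation of the multi-pattern match).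
import Mathlib
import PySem

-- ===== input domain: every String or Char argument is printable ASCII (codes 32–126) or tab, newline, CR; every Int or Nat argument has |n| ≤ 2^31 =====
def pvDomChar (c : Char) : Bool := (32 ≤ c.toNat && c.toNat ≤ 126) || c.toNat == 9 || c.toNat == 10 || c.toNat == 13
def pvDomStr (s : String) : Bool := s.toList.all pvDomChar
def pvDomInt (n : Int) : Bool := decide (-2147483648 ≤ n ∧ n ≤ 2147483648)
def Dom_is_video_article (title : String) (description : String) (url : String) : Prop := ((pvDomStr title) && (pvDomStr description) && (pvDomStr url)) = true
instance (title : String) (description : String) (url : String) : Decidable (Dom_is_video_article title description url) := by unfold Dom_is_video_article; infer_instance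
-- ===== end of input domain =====

-- B replaces A's per-keyword substring scans by one streaming pass maintaining partially matched keyword suffixes (alternative algorithm, same cost class).


-- ===== PORT A =====
-- the six keywords, as in A (as char lists; all string work is done on .toList)
def pvKeywords : List (List Char) :=
  ["watch:".toList, "video:".toList, "segment -".toList,
   "pbs newshour episode".toList, "full episode".toList, "video episode".toList]

-- f"{title} {description} {url}".lower(), on the char-list side
def pvCombined (title description url : String) : List Char :=
  PySem.Chars.lower (title.toList ++ ' ' :: (description.toList ++ ' ' :: url.toList))

-- A's loop: for keyword in video_keywords: if keyword in combined: return True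
def pvLoopA (combined : List Char) : List (List Char) → Bool
  | [] => false
  | k :: rest => if PySem.Chars.isIn k combined then true else pvLoopA combined rest

def is_video_article (title : String) (description : String) (url : String) : Bool :=
  pvLoopA (pvCombined title description url) pvKeywords

-- ===== PORT B =====
-- B's inner loop: for k in active + keywords: if k[0]==ch: rest=k[1:]; if not rest: return True
-- else next_active.append(rest).  'none' = B's early 'return True'; no empty candidate is ever
-- stored, so the '[] :: ks' case (where Python's k[0] would raise) is unreachable.
def pvAdvance (ch : Char) : List (List Char) → Option (List (List Char))
  | [] => some []
  | [] :: ks => pvAdvance ch ks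
  | (c :: cs) :: ks =>
    if c == ch then
      if cs.isEmpty then none
      else (pvAdvance ch ks).map (cs :: ·)
    else pvAdvance ch ks

-- B's outer loop: for ch in s, threading the active partial matches
def pvRun : List (List Char) → List Char → Bool
  | _, [] => false
  | active, ch :: t =>
    match pvAdvance ch (active ++ pvKeywords) with
    | none => true
    | some next => pvRun next t

def is_video_article_alt (title : String) (description : String) (url : String) : Bool :=
  pvRun [] (pvCombined title description url)

-- ===== PRECONDITION & SPEC =====
def Spec_is_video_article (title : String) (description : String) (url : String) (out : Bool) : Prop := out = is_video_article_alt title description url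
instance (title : String) (description : String) (url : String) (out : Bool) : Decidable (Spec_is_video_article title description url out) := by unfold Spec_is_video_article; infer_instance

-- ===== CLAIM (what is proved, stated in full; the proofs are below) =====
def Claim_equal_is_video_article : Prop := ∀ (title : String) (description : String) (url : String), Dom_is_video_article title description url → Spec_is_video_article title description url (is_video_article title description url)

-- ===== LEMMAS AND PROOFS =====

theorem pv_loopA_eq_any (combined : List Char) (kws : List (List Char)) :
    pvLoopA combined kws = kws.any (fun k => PySem.Chars.isIn k combined) := by
  induction kws with
  | nil => rfl
  | cons k rest ih =>
    simp only [pvLoopA, List.any_cons, ih]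
    cases PySem.Chars.isIn k combined <;> simp

-- one scan step: k is a substring of c::t iff it starts at the head or is a substring of t
theorem pv_isIn_cons (k : List Char) (c : Char) (t : List Char) :
    PySem.Chars.isIn k (c :: t) = (k.isPrefixOf (c :: t) || PySem.Chars.isIn k t) := by
  rw [Bool.eq_iff_iff]
  simp [PySem.Chars.isIn_iff_infix, List.infix_cons_iff, List.isPrefixOf_iff_prefix]

theorem pv_any_orfun {α : Type} (l : List α) (p q : α → Bool) :
    l.any (fun x => p x || q x) = (l.any p || l.any q) := by
  induction l with
  | nil => rfl
  | cons x xs ih =>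
    simp only [List.any_cons, ih]
    cases p x <;> cases q x <;> simp

-- pvAdvance reports an immediate match exactly when some candidate is the single char ch
theorem pvAdvance_none_iff (ch : Char) (cands : List (List Char))
    (h : ∀ k ∈ cands, k ≠ []) :
    pvAdvance ch cands = none ↔ [ch] ∈ cands := by
  induction cands with
  | nil => simp [pvAdvance]
  | cons k ks ih =>
    have hks : ∀ k ∈ ks, k ≠ [] := fun k hk => h k (List.mem_cons_of_mem _ hk)
    match k with
    | [] => exact absurd rfl (h [] (List.mem_cons_self))
    | c :: cs =>
      simp only [pvAdvance, List.mem_cons]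
      by_cases hc : c = ch
      · subst hc
        rcases eq_or_ne cs [] with rfl | hcs
        · simp
        · have hie : cs.isEmpty = false := by simp [hcs]
          have hne : ¬([c] = c :: cs) := by
            intro h'; injection h' with _ h2; exact hcs h2.symm
          simp [hie, ih hks, hne]
      · have hcb : (c == ch) = false := by simp [hc]
        have hne2 : ¬([ch] = c :: cs) := by
          intro h'; injection h' with h1 _; exact hc h1.symm
        simp [hcb, ih hks, hne2]

-- on 'some next', the surviving suffixes match t exactly when the candidates match ch::t
theorem pvAdvance_some_spec (ch : Char) (cands next : List (List Char))
    (h : ∀ k ∈ cands, k ≠ []) (he : pvAdvance ch cands = some next) :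
    (∀ k ∈ next, k ≠ []) ∧
      ∀ t, next.any (fun k => k.isPrefixOf t) = cands.any (fun k => k.isPrefixOf (ch :: t)) := by
  induction cands generalizing next with
  | nil =>
    simp only [pvAdvance, Option.some.injEq] at he
    subst he; exact ⟨by simp, by simp⟩
  | cons k ks ih =>
    have hks : ∀ k ∈ ks, k ≠ [] := fun k hk => h k (List.mem_cons_of_mem _ hk)
    match k with
    | [] => exact absurd rfl (h [] (List.mem_cons_self))
    | c :: cs =>
      simp only [pvAdvance] at he
      by_cases hc : c = ch
      · subst hc
        simp only [beq_self_eq_true, if_true] at he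
        cases hcs : cs.isEmpty
        · rw [hcs] at he
          simp only [Bool.false_eq_true, if_false, Option.map_eq_some_iff] at he
          obtain ⟨next', he', rfl⟩ := he
          obtain ⟨h1, h2⟩ := ih _ hks he'
          have hcs' : cs ≠ [] := by simpa [List.isEmpty_iff] using hcs
          refine ⟨?_, ?_⟩
          · intro k hk
            rcases List.mem_cons.mp hk with rfl | hk
            · exact hcs'
            · exact h1 k hk
          · intro t
            simp [List.any_cons, h2 t, List.isPrefixOf]
        · rw [hcs] at he; simp at he
      · have hcb : (c == ch) = false := by simp [hc]
        rw [hcb] at he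
        simp only [Bool.false_eq_true, if_false] at he
        obtain ⟨h1, h2⟩ := ih _ hks he
        refine ⟨h1, ?_⟩
        intro t
        simp [List.any_cons, h2 t, List.isPrefixOf, hcb]

-- keywords are nonempty
theorem pvKeywords_ne_nil : ∀ k ∈ pvKeywords, k ≠ [] := by decide

-- the loop invariant: B's scan is true iff an active suffix completes or a keyword occurs in s
theorem pvRun_spec (s : List Char) : ∀ (active : List (List Char)),
    (∀ k ∈ active, k ≠ []) →
    pvRun active s
      = (active.any (fun k => k.isPrefixOf s)
          || pvKeywords.any (fun k => PySem.Chars.isIn k s)) := by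
  induction s with
  | nil =>
    intro active h
    have h1 : active.any (fun k => k.isPrefixOf ([] : List Char)) = false := by
      simp only [List.any_eq_false]
      intro k hk
      cases k with
      | nil => exact absurd rfl (h [] hk)
      | cons c cs => simp [List.isPrefixOf]
    have h2 : pvKeywords.any (fun k => PySem.Chars.isIn k ([] : List Char)) = false := by decide
    simp [pvRun, h1, h2]
  | cons ch t ih =>
    intro active h
    have hcands : ∀ k ∈ (active ++ pvKeywords), k ≠ [] := by
      intro k hk
      rcases List.mem_append.mp hk with hk | hk
      · exact h k hk
      · exact pvKeywords_ne_nil k hk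
    cases hadv : pvAdvance ch (active ++ pvKeywords) with
    | none =>
      have hrun : pvRun active (ch :: t) = true := by simp [pvRun, hadv]
      rw [hrun]
      have hmem : [ch] ∈ active ++ pvKeywords := (pvAdvance_none_iff ch _ hcands).mp hadv
      have hpref : ([ch]).isPrefixOf (ch :: t) = true := by simp [List.isPrefixOf]
      rcases List.mem_append.mp hmem with hk | hk
      · have : active.any (fun k => k.isPrefixOf (ch :: t)) = true :=
          List.any_eq_true.mpr ⟨[ch], hk, hpref⟩
        simp [this]
      · have hin : PySem.Chars.isIn [ch] (ch :: t) = true := by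
          rw [pv_isIn_cons]; simp [hpref]
        have : pvKeywords.any (fun k => PySem.Chars.isIn k (ch :: t)) = true :=
          List.any_eq_true.mpr ⟨[ch], hk, hin⟩
        simp [this]
    | some next =>
      obtain ⟨h1, h2⟩ := pvAdvance_some_spec ch _ next hcands hadv
      have hrun : pvRun active (ch :: t) = pvRun next t := by simp [pvRun, hadv]
      rw [hrun, ih next h1, h2 t]
      have hsplit : pvKeywords.any (fun k => PySem.Chars.isIn k (ch :: t))
          = (pvKeywords.any (fun k => k.isPrefixOf (ch :: t))
              || pvKeywords.any (fun k => PySem.Chars.isIn k t)) := by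
        simp only [pv_isIn_cons]
        exact pv_any_orfun _ _ _
      rw [hsplit, List.any_append]
      cases active.any (fun k => k.isPrefixOf (ch :: t)) <;>
        cases pvKeywords.any (fun k => k.isPrefixOf (ch :: t)) <;>
          cases pvKeywords.any (fun k => PySem.Chars.isIn k t) <;> simp

-- ===== VERDICT (by name: the statement is the Claim_ definition above) =====
theorem is_video_article_spec : Claim_equal_is_video_article := by
  intro title description url _
  unfold Spec_is_video_article is_video_article is_video_article_alt
  rw [pv_loopA_eq_any, pvRun_spec _ [] (by simp)]
  simp
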